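-- pv_equiv track=rewrite | github.com/uzairh1/UCLA-coursework | Computer Science 30 - Principles and Practices of Computing/Homework 2/hw2.py | countPos
-- ===== SOURCE A (Python) =====
-- def countPos(l):
--     # I used the following resource to help solve this problem:
--     # python-tutor.com
--     if l == []:
--         return 0
--     else:
--         head = l[0]
--         tail = l[1:]
--         recursiveResult = countPos(tail)
--         if head > 0:
--             return 1 + recursiveResult
--         if head < 0 or head == 0:
--             return recursiveResult
-- ===== SOURCE B (Python) =====
-- def countPos(l):
--     count = 0
--     for x in l:
--         if x > 0:
--             count += 1
--     return count
-- ===== Notes on version B (the rewrite author's own statement) =====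
-- stated objective: simpler
-- what changed: Replaced head/tail recursion (which copies the tail with l[1:] at every call) with a single iterative loop over the list maintaining a running count.
import Mathlib
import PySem

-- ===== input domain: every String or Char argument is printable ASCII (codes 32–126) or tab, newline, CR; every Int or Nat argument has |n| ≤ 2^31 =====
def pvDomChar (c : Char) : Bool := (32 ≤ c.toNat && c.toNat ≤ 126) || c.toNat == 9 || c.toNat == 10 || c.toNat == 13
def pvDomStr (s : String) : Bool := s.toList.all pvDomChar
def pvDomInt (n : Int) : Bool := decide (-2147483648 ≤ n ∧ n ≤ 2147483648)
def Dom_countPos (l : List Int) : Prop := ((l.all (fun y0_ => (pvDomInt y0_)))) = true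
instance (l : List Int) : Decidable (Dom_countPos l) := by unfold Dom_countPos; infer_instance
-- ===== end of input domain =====

-- B replaces A's head/tail recursion (which copies the tail at every call) with one iterative loop and a running count.


-- ===== PORT A =====
-- l == [] / head = l[0], tail = l[1:] rendered as the match on the list
def countPos (l : List Int) : Int :=
  match l with
  | [] => 0
  | head :: tail =>
    let recursiveResult := countPos tail
    if head > 0 then 1 + recursiveResult
    else recursiveResult

-- ===== PORT B =====
def countPos_alt (l : List Int) : Int :=
  l.foldl (fun count x => if x > 0 then count + 1 else count) 0

-- ===== PRECONDITION & SPEC =====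
def Spec_countPos (l : List Int) (out : Int) : Prop := out = countPos_alt l
instance (l : List Int) (out : Int) : Decidable (Spec_countPos l out) := by unfold Spec_countPos; infer_instance

-- ===== CLAIM (what is proved, stated in full; the proofs are below) =====
def Claim_equal_countPos : Prop := ∀ (l : List Int), Dom_countPos l → Spec_countPos l (countPos l)

-- ===== LEMMAS AND PROOFS =====
def countPos_alt_go (l : List Int) (c : Int) : Int :=
  l.foldl (fun count x => if x > 0 then count + 1 else count) c

theorem countPos_alt_go_acc (l : List Int) (c : Int) :
    countPos_alt_go l c = c + countPos_alt_go l 0 := by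
  induction l generalizing c with
  | nil => simp [countPos_alt_go]
  | cons h t ih =>
    simp only [countPos_alt_go, List.foldl] at *
    rw [ih, ih (if h > 0 then 0 + 1 else 0)]
    split_ifs <;> omega

-- ===== VERDICT (by name: the statement is the Claim_ definition above) =====
theorem countPos_eq (l : List Int) : countPos l = countPos_alt l := by
  induction l with
  | nil => rfl
  | cons h t ih =>
    have key : countPos_alt (h :: t) =
        (if h > 0 then (0:Int) + 1 else 0) + countPos_alt t := by
      show countPos_alt_go (h :: t) 0 = _
      rw [show countPos_alt_go (h :: t) 0 =
          countPos_alt_go t (if h > 0 then (0:Int) + 1 else 0) from rfl,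
        countPos_alt_go_acc]
      rfl
    rw [countPos, key, ← ih]
    split_ifs <;> omega

theorem countPos_spec : Claim_equal_countPos := fun l _ => countPos_eq l
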